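-- pv_equiv track=rewrite | github.com/dadongshangu/dadongshangu.github.io | blog/migration/scripts/import_wechatsync_md.py | clean_extra_whitespace
-- ===== SOURCE A (Python) =====
-- def clean_extra_whitespace(text: str) -> str:
--     """清理多余的空行和空白字符"""
--     lines = text.split("\n")
--     cleaned_lines = []
--
--     for line in lines:
--         stripped = line.strip()
--         # 删除单独的下划线行（通常是格式残留）
--         if stripped == "_" or stripped == "__" or stripped == "___":
--             continue
--         # 删除只包含空格和下划线的行
--         if stripped and all(c in " _-" for c in stripped) and len(stripped) <= 5:
--             continue
--         cleaned_lines.append(line.rstrip())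
--
--     # 将连续多个空行压缩为最多1个
--     result_lines = []
--     prev_empty = False
--     for line in cleaned_lines:
--         is_empty = not line.strip()
--         if is_empty:
--             if not prev_empty:  # 只保留第一个空行
--                 result_lines.append("")
--             prev_empty = True
--         else:
--             result_lines.append(line)
--             prev_empty = False
--
--     # 删除开头和结尾的空行
--     while result_lines and not result_lines[0].strip():
--         result_lines.pop(0)
--     while result_lines and not result_lines[-1].strip():
--         result_lines.pop()
--
--     return "\n".join(result_lines).strip()
-- ===== SOURCE B (Python) =====
-- def clean_extra_whitespace(text: str) -> str:
--     """Paragraph-based rewrite: drop decoration lines, group the remaining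
--     non-blank (rstripped) lines into paragraphs, join paragraphs with blank lines."""
--
--     def is_junk(line):
--         s = line.strip()
--         return bool(s) and len(s) <= 5 and set(s) <= set(" _-")
--
--     kept = [line.rstrip() for line in text.split("\n") if not is_junk(line)]
--
--     paragraphs, current = [], []
--     for line in kept:
--         if line:
--             current.append(line)
--         elif current:
--             paragraphs.append(current)
--             current = []
--     if current:
--         paragraphs.append(current)
--
--     return "\n\n".join("\n".join(p) for p in paragraphs).strip()
-- ===== Notes on version B (the rewrite author's own statement) =====
-- stated objective: alternative
-- what changed: B reorganises the task around paragraphs: after one filter of decoration lines (the redundant explicit underscore checks folded into the general test), it groups consecutive non-blank lines into a list of paragraphs and joins them with blank separators, instead of A's blank-collapsing flag loop plus two edge-trimming while-pop loops.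
import Mathlib
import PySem

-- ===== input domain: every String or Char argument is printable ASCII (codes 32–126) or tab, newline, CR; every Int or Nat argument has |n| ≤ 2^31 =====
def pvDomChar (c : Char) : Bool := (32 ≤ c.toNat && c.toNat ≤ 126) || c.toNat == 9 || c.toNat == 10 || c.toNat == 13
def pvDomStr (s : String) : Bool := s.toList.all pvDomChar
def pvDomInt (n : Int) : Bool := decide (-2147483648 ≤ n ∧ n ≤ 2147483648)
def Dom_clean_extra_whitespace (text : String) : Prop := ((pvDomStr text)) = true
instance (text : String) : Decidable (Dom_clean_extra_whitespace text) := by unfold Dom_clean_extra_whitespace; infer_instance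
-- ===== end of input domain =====

-- B reorganises the task around paragraphs: one filter of decoration lines, then the
-- remaining non-blank lines are grouped into paragraphs joined by "\n\n", replacing A's
-- blank-collapsing flag loop and its two edge-trimming while-pop loops; same return value.

-- ===== PORT A =====
-- Ported on the code-point list side (PySem.Chars); the two `while … pop` edge trims are the
-- obvious dropWhile from the front and (via reverse) from the back.
def clean_extra_whitespace (text : String) : String :=
  let lines := PySem.Chars.splitOn text.toList ['\n']
  let cleaned := lines.foldl (fun acc line =>
      let s := PySem.Chars.strip line
      if s == ['_'] || s == ['_', '_'] || s == ['_', '_', '_'] then acc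
      else if !s.isEmpty && s.all (fun c => [' ', '_', '-'].contains c) && decide (s.length ≤ 5) then acc
      else acc ++ [PySem.Chars.rstrip line]) []
  let res := cleaned.foldl (fun (st : List (List Char) × Bool) line =>
      if (PySem.Chars.strip line).isEmpty then
        (if st.2 then st.1 else st.1 ++ [[]], true)
      else (st.1 ++ [line], false)) ([], false)
  let rs₁ := res.1.dropWhile (fun l => (PySem.Chars.strip l).isEmpty)
  let rs₂ := (rs₁.reverse.dropWhile (fun l => (PySem.Chars.strip l).isEmpty)).reverse
  String.ofList (PySem.Chars.strip (PySem.Chars.join ['\n'] rs₂))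

-- ===== PORT B =====
-- `set(s) <= set(" _-")` is ported as `s.all (… contains …)` (subset of a char set = every char in it).
def clean_extra_whitespace_alt (text : String) : String :=
  let kept := ((PySem.Chars.splitOn text.toList ['\n']).filter
      (fun line =>
        let s := PySem.Chars.strip line
        !(!s.isEmpty && decide (s.length ≤ 5) && s.all (fun c => [' ', '_', '-'].contains c)))).map
      PySem.Chars.rstrip
  let st := kept.foldl
    (fun (st : List (List (List Char)) × List (List Char)) line =>
      if !line.isEmpty then (st.1, st.2 ++ [line])
      else if !st.2.isEmpty then (st.1 ++ [st.2], ([] : List (List Char)))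
      else st) ([], [])
  let paragraphs := if !st.2.isEmpty then st.1 ++ [st.2] else st.1
  String.ofList (PySem.Chars.strip
    (PySem.Chars.join ['\n', '\n'] (paragraphs.map (PySem.Chars.join ['\n']))))

-- ===== PRECONDITION & SPEC =====
def Spec_clean_extra_whitespace (text : String) (out : String) : Prop := out = clean_extra_whitespace_alt text
instance (text : String) (out : String) : Decidable (Spec_clean_extra_whitespace text out) := by unfold Spec_clean_extra_whitespace; infer_instance

-- ===== CLAIM (what is proved, stated in full; the proofs are below) =====
def Claim_equal_clean_extra_whitespace : Prop := ∀ (text : String), Dom_clean_extra_whitespace text → Spec_clean_extra_whitespace text (clean_extra_whitespace text)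

-- ===== LEMMAS AND PROOFS =====

-- A's skip test and B's skip test, named for the proofs
def pvSkip (line : List Char) : Bool :=
  let s := PySem.Chars.strip line
  (s == ['_'] || s == ['_', '_'] || s == ['_', '_', '_'])
    || (!s.isEmpty && s.all (fun c => [' ', '_', '-'].contains c) && decide (s.length ≤ 5))

def pvJunk (line : List Char) : Bool :=
  let s := PySem.Chars.strip line
  !s.isEmpty && decide (s.length ≤ 5) && s.all (fun c => [' ', '_', '-'].contains c)

-- A's blank-collapsing step and B's paragraph step, named for the proofs
def pvStepC (st : List (List Char) × Bool) (line : List Char) : List (List Char) × Bool :=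
  if (PySem.Chars.strip line).isEmpty then
    (if st.2 then st.1 else st.1 ++ [[]], true)
  else (st.1 ++ [line], false)

def pvStepB (st : List (List (List Char)) × List (List Char)) (line : List Char) :
    List (List (List Char)) × List (List Char) :=
  if !line.isEmpty then (st.1, st.2 ++ [line])
  else if !st.2.isEmpty then (st.1 ++ [st.2], ([] : List (List Char)))
  else st

def pvFin (st : List (List (List Char)) × List (List Char)) : List (List (List Char)) :=
  if !st.2.isEmpty then st.1 ++ [st.2] else st.1

-- A's `cleaned_lines` as filter-then-map
def pvCleanList (lines : List (List Char)) : List (List Char) :=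
  ((lines.filter (fun l => !pvSkip l)).map PySem.Chars.rstrip)

def pvStripJoin (xs : List (List Char)) : List Char :=
  PySem.Chars.strip (PySem.Chars.join ['\n'] xs)

-- recursive characterisation of A's collapse loop
def pvCollapse : Bool → List (List Char) → List (List Char)
  | _, [] => []
  | prev, l :: ls =>
    if (PySem.Chars.strip l).isEmpty then
      (if prev then [] else [[]]) ++ pvCollapse true ls
    else l :: pvCollapse false ls

-- recursive characterisation of B's paragraph grouping
def pvParas : List (List Char) → List (List Char) → List (List (List Char))
  | cur, [] => if cur.isEmpty then [] else [cur]
  | cur, l :: ls =>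
    if !l.isEmpty then pvParas (cur ++ [l]) ls
    else if !cur.isEmpty then cur :: pvParas [] ls
    else pvParas [] ls

-- the single trailing blank marker A's collapse emits when the input ends in blank lines
def pvPend (ls : List (List Char)) : List (List Char) :=
  if ls.getLast? = some [] then [[]] else []

lemma pv_if_if_or {α : Type} (c1 c2 : Bool) (a x : α) :
    (if c1 then a else if c2 then a else x) = if !(c1 || c2) then x else a := by
  cases c1 <;> cases c2 <;> rfl

lemma pv_clean_fold_eq (lines : List (List Char)) (acc : List (List Char)) :
    lines.foldl (fun acc line =>
      let s := PySem.Chars.strip line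
      if s == ['_'] || s == ['_', '_'] || s == ['_', '_', '_'] then acc
      else if !s.isEmpty && s.all (fun c => [' ', '_', '-'].contains c) && decide (s.length ≤ 5) then acc
      else acc ++ [PySem.Chars.rstrip line]) acc = acc ++ pvCleanList lines := by
  have hf : (fun (acc : List (List Char)) line =>
      let s := PySem.Chars.strip line
      if s == ['_'] || s == ['_', '_'] || s == ['_', '_', '_'] then acc
      else if !s.isEmpty && s.all (fun c => [' ', '_', '-'].contains c) && decide (s.length ≤ 5) then acc
      else acc ++ [PySem.Chars.rstrip line]) =
      (fun acc line => if !pvSkip line then acc ++ [PySem.Chars.rstrip line] else acc) := by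
    funext acc line
    show (if _ then _ else if _ then _ else _) = _
    rw [pv_if_if_or]
    rfl
  rw [hf, PySem.List.foldl_append_if]
  rfl

-- A's skip test equals B's simpler one: the explicit '_'/'__'/'___' checks are subsumed
lemma pv_skip_eq_junk (l : List Char) : pvSkip l = pvJunk l := by
  unfold pvSkip pvJunk
  generalize PySem.Chars.strip l = s
  by_cases h1 : s = ['_']
  · subst h1; decide
  by_cases h2 : s = ['_', '_']
  · subst h2; decide
  by_cases h3 : s = ['_', '_', '_']
  · subst h3; decide
  have b1 : (s == ['_']) = false := beq_eq_false_iff_ne.mpr h1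
  have b2 : (s == ['_', '_']) = false := beq_eq_false_iff_ne.mpr h2
  have b3 : (s == ['_', '_', '_']) = false := beq_eq_false_iff_ne.mpr h3
  simp only [b1, b2, b3, Bool.or_self, Bool.false_or]
  cases s.isEmpty <;> cases hd : decide (s.length ≤ 5) <;>
    cases ha : s.all (fun c => [' ', '_', '-'].contains c) <;> simp

lemma pv_clean_eq_keptB (lines : List (List Char)) :
    pvCleanList lines = (lines.filter (fun l => !pvJunk l)).map PySem.Chars.rstrip := by
  unfold pvCleanList
  congr 1
  apply List.filter_congr
  intro l _
  rw [pv_skip_eq_junk]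

-- fold-to-recursion for A's collapse loop
lemma pv_foldC (ls : List (List Char)) (acc : List (List Char)) (prev : Bool) :
    (ls.foldl pvStepC (acc, prev)).1 = acc ++ pvCollapse prev ls := by
  induction ls generalizing acc prev with
  | nil => simp [pvCollapse]
  | cons l ls ih =>
    by_cases h : (PySem.Chars.strip l).isEmpty = true
    · cases prev <;> simp [pvStepC, pvCollapse, h, ih]
    · simp [pvStepC, pvCollapse, h, ih]

-- fold-to-recursion for B's paragraph loop (with the final flush)
lemma pv_foldB (ls : List (List Char)) (paras : List (List (List Char))) (cur : List (List Char)) :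
    pvFin (ls.foldl pvStepB (paras, cur)) = paras ++ pvParas cur ls := by
  induction ls generalizing paras cur with
  | nil => by_cases h : cur.isEmpty <;> simp [pvFin, pvParas, h]
  | cons l ls ih =>
    by_cases hl : l.isEmpty
    · by_cases hc : cur.isEmpty
      · have hc0 : cur = [] := List.isEmpty_iff.mp hc
        subst hc0
        simp [pvStepB, pvParas, hl, ih]
      · simp [pvStepB, pvParas, hl, hc, ih]
    · simp [pvStepB, pvParas, hl, ih]

-- blank ⇔ empty, for rstripped lines
lemma pv_dropWhile_idem (p : Char → Bool) (l : List Char) :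
    (l.dropWhile p).dropWhile p = l.dropWhile p := by
  induction l with
  | nil => rfl
  | cons a l ih =>
    by_cases h : p a = true <;> simp [h, ih]

lemma pv_rstrip_idem (l : List Char) :
    PySem.Chars.rstrip (PySem.Chars.rstrip l) = PySem.Chars.rstrip l := by
  simp [PySem.Chars.rstrip, pv_dropWhile_idem]

lemma pv_rstrip_empty_iff (Y : List Char) :
    (PySem.Chars.rstrip Y).isEmpty = true ↔ ∀ c ∈ Y, PySem.Chars.isspace c = true := by
  simp [PySem.Chars.rstrip, List.isEmpty_iff, List.dropWhile_eq_nil_iff]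

lemma pv_all_dropWhile (p : Char → Bool) (X : List Char) :
    (∀ c ∈ X.dropWhile p, p c = true) ↔ (∀ c ∈ X, p c = true) := by
  constructor
  · intro h c hc
    have hsplit : c ∈ X.takeWhile p ++ X.dropWhile p := by
      rw [List.takeWhile_append_dropWhile]; exact hc
    rcases List.mem_append.mp hsplit with h' | h'
    · exact List.mem_takeWhile_imp h'
    · exact h c h'
  · intro h c hc
    exact h c ((List.dropWhile_sublist (p := p)).mem hc)

lemma pv_strip_isEmpty (X : List Char) :
    (PySem.Chars.strip X).isEmpty = (PySem.Chars.rstrip X).isEmpty := by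
  rw [Bool.eq_iff_iff]
  rw [pv_rstrip_empty_iff]
  show (PySem.Chars.rstrip (PySem.Chars.lstrip X)).isEmpty = true ↔ _
  rw [pv_rstrip_empty_iff]
  simp only [PySem.Chars.lstrip]
  exact pv_all_dropWhile _ X

lemma pv_kept_blank (x : List Char) :
    (PySem.Chars.strip (PySem.Chars.rstrip x)).isEmpty = (PySem.Chars.rstrip x).isEmpty := by
  rw [pv_strip_isEmpty, pv_rstrip_idem]

-- facts about pvParas
lemma pv_paras_ne (ls : List (List Char)) :
    ∀ cur, cur ≠ [] → pvParas cur ls ≠ [] := by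
  induction ls with
  | nil =>
    intro cur h
    simp [pvParas, List.isEmpty_iff, h]
  | cons l ls ih =>
    intro cur h
    by_cases hl : l.isEmpty
    · simp [pvParas, hl, List.isEmpty_iff.not.mpr h]
    · simpa [pvParas, hl] using ih (cur ++ [l]) (by simp)

lemma pv_paras_nil_blank (ls : List (List Char)) :
    pvParas [] ls = [] → ∀ x ∈ ls, x = [] := by
  induction ls with
  | nil => simp
  | cons l ls ih =>
    intro h x hx
    by_cases hl : l.isEmpty
    · simp only [pvParas, hl, Bool.not_true, Bool.false_eq_true, if_false,
        List.isEmpty_nil, if_true] at h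
      rcases List.mem_cons.mp hx with rfl | hx
      · exact List.isEmpty_iff.mp hl
      · exact ih h x hx
    · exfalso
      apply pv_paras_ne ls [l] (by simp)
      simpa [pvParas, hl] using h

lemma pv_paras_mem_ne (ls : List (List Char)) :
    ∀ cur p, p ∈ pvParas cur ls → p ≠ [] := by
  induction ls with
  | nil =>
    intro cur p hp
    by_cases hc : cur.isEmpty
    · simp [pvParas, hc] at hp
    · simp only [pvParas, hc, Bool.false_eq_true, if_false, List.mem_singleton] at hp
      subst hp
      exact List.isEmpty_iff.not.mp (by simp [hc])
  | cons l ls ih =>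
    intro cur p hp
    by_cases hl : l.isEmpty
    · by_cases hc : cur.isEmpty
      · exact ih [] p (by simpa [pvParas, hl, hc] using hp)
      · simp only [pvParas, hl, Bool.not_true, Bool.false_eq_true, if_false, hc,
          Bool.not_false, if_true, List.mem_cons] at hp
        rcases hp with rfl | hp
        · exact List.isEmpty_iff.not.mp (by simp [hc])
        · exact ih [] p hp
    · exact ih (cur ++ [l]) p (by simpa [pvParas, hl] using hp)

-- intercalate facts
lemma pv_intercalate_cons {α : Type} (sep a : List α) (rest : List (List α)) (h : rest ≠ []) :
    List.intercalate sep (a :: rest) = a ++ sep ++ List.intercalate sep rest := by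
  cases rest with
  | nil => exact absurd rfl h
  | cons b r =>
    simp [List.intercalate, List.intersperse_cons₂, List.append_assoc]

lemma pv_intercalate_ne {α : Type} (sep : List α) (q : List α) (R : List (List α)) (hq : q ≠ []) :
    List.intercalate sep (q :: R) ≠ [] := by
  cases R with
  | nil => simpa [List.intercalate] using hq
  | cons b r =>
    rw [pv_intercalate_cons sep q (b :: r) (by simp)]
    simp [hq]

lemma pv_intercalate_append {α : Type} (sep : List α) (as bs : List (List α))
    (ha : as ≠ []) (hb : bs ≠ []) :
    List.intercalate sep (as ++ bs) = List.intercalate sep as ++ sep ++ List.intercalate sep bs := by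
  induction as with
  | nil => exact absurd rfl ha
  | cons a as ih =>
    cases as with
    | nil =>
      rw [List.singleton_append, pv_intercalate_cons sep a bs hb]
      simp [List.intercalate]
    | cons a' as' =>
      rw [List.cons_append, pv_intercalate_cons sep a ((a' :: as') ++ bs) (by simp),
        ih (by simp), pv_intercalate_cons sep a (a' :: as') (by simp)]
      simp [List.append_assoc]

-- joining the blank-separated line list = joining the paragraphs with "\n\n"
lemma pv_join_paras (P : List (List (List Char))) (h : ∀ p ∈ P, p ≠ []) :
    PySem.Chars.join ['\n'] (List.intercalate [[]] P)
      = PySem.Chars.join ['\n', '\n'] (P.map (PySem.Chars.join ['\n'])) := by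
  induction P with
  | nil => rfl
  | cons p P ih =>
    cases P with
    | nil => simp [PySem.Chars.join, List.intercalate]
    | cons q R =>
      have hp : p ≠ [] := h p List.mem_cons_self
      have hq : q ≠ [] := h q (by simp)
      have hX : List.intercalate [[]] (q :: R) ≠ [] := pv_intercalate_ne _ q R hq
      have hR : List.intercalate ['\n'] (List.intercalate [[]] (q :: R))
          = List.intercalate ['\n', '\n'] ((q :: R).map (PySem.Chars.join ['\n'])) :=
        ih (fun x hx => h x (List.mem_cons_of_mem _ hx))
      show List.intercalate ['\n'] (List.intercalate [[]] (p :: q :: R))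
          = List.intercalate ['\n', '\n'] ((p :: q :: R).map (PySem.Chars.join ['\n']))
      rw [pv_intercalate_cons [[]] p (q :: R) (by simp)]
      rw [pv_intercalate_append ['\n'] (p ++ [[]]) (List.intercalate [[]] (q :: R))
        (by simp) hX]
      rw [pv_intercalate_append ['\n'] p [[]] hp (by simp)]
      rw [List.map_cons]
      rw [pv_intercalate_cons ['\n', '\n'] (PySem.Chars.join ['\n'] p)
        ((q :: R).map (PySem.Chars.join ['\n'])) (by simp)]
      rw [← hR]
      have h0 : List.intercalate ['\n'] [[]] = ([] : List Char) := by
        simp [List.intercalate]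
      rw [h0]
      show List.intercalate ['\n'] p ++ ['\n'] ++ [] ++ ['\n']
          ++ List.intercalate ['\n'] (List.intercalate [[]] (q :: R))
        = List.intercalate ['\n'] p ++ ['\n', '\n']
          ++ List.intercalate ['\n'] (List.intercalate [[]] (q :: R))
      simp [List.append_assoc]

-- pvPend bookkeeping
lemma pv_pend_cons (l : List Char) (ls : List (List Char)) (hls : ls ≠ []) :
    pvPend (l :: ls) = pvPend ls := by
  cases ls with
  | nil => exact absurd rfl hls
  | cons b r => simp [pvPend, List.getLast?_cons_cons]

-- THE STRUCTURAL BRIDGE: A's collapse output is the paragraphs separated by single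
-- blank markers, plus a possible trailing marker (joint induction, true/false states).
lemma pv_TC (ls : List (List Char))
    (h : ∀ l ∈ ls, (PySem.Chars.strip l).isEmpty = l.isEmpty) :
    (pvCollapse true ls = List.intercalate [[]] (pvParas [] ls)
        ++ (if pvParas [] ls = [] then [] else pvPend ls))
    ∧ ∀ cur, cur ≠ [] →
      cur ++ pvCollapse false ls = List.intercalate [[]] (pvParas cur ls) ++ pvPend ls := by
  induction ls with
  | nil =>
    constructor
    · simp [pvCollapse, pvParas, List.intercalate]
    · intro cur hc
      simp [pvCollapse, pvParas, pvPend, List.isEmpty_iff.not.mpr hc, List.intercalate]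
  | cons l ls ih =>
    have hl := h l List.mem_cons_self
    obtain ⟨ihT, ihC⟩ := ih (fun x hx => h x (List.mem_cons_of_mem _ hx))
    by_cases hb : l.isEmpty
    · -- blank line
      have hbl : (PySem.Chars.strip l).isEmpty = true := by rw [hl]; exact hb
      have hleq : l = [] := List.isEmpty_iff.mp hb
      subst hleq
      constructor
      · -- true state: the blank is swallowed
        show (if (PySem.Chars.strip []).isEmpty then
            (if true then [] else [[]]) ++ pvCollapse true ls else _) = _
        rw [if_pos hbl, if_pos rfl, List.nil_append]
        have hpar : pvParas [] ([] :: ls) = pvParas [] ls := by simp [pvParas]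
        rw [hpar, ihT]
        by_cases hP : pvParas [] ls = []
        · simp [hP]
        · have hls : ls ≠ [] := by
            rintro rfl; exact hP rfl
          rw [if_neg hP, if_neg hP, pv_pend_cons [] ls hls]
      · intro cur hc
        show cur ++ (if (PySem.Chars.strip []).isEmpty then
            (if false then [] else [[]]) ++ pvCollapse true ls else _) = _
        rw [if_pos hbl, if_neg (by simp), ihT]
        have hpar : pvParas cur ([] :: ls) = cur :: pvParas [] ls := by
          simp [pvParas, List.isEmpty_iff.not.mpr hc]
        rw [hpar]
        by_cases hP : pvParas [] ls = []
        · -- the tail is all blank: only the single trailing marker remains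
          have hblank := pv_paras_nil_blank ls hP
          have hpend : pvPend ([] :: ls) = [[]] := by
            cases hls : ls with
            | nil => simp [pvPend]
            | cons b r =>
              rw [pv_pend_cons [] (b :: r) (by simp)]
              have hz : ∀ x ∈ b :: r, x = [] := fun x hx => hblank x (by rw [hls]; exact hx)
              have hgl : (b :: r).getLast? = some [] := by
                rw [List.getLast?_cons]
                cases hr : r.getLast? with
                | none => simp [hz b List.mem_cons_self]
                | some y =>
                  have hy := hz y (List.mem_cons_of_mem _ (List.mem_of_getLast? hr))
                  simp [hy]
              simp [pvPend, hgl]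
          rw [hP, if_pos rfl, hpend]
          simp [List.intercalate]
        · have hls : ls ≠ [] := by rintro rfl; exact hP rfl
          rw [if_neg hP, pv_intercalate_cons [[]] cur (pvParas [] ls) hP,
            pv_pend_cons [] ls hls]
          simp [List.append_assoc]
    · -- non-blank line
      have hbl : (PySem.Chars.strip l).isEmpty = false := by rw [hl]; simpa using hb
      have hlne : l ≠ [] := List.isEmpty_iff.not.mp (by simpa using hb)
      have hpend : pvPend (l :: ls) = pvPend ls := by
        cases hls : ls with
        | nil => simp [pvPend, hlne]
        | cons b r => exact pv_pend_cons l (b :: r) (by simp)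
      constructor
      · show (if (PySem.Chars.strip l).isEmpty then _ else l :: pvCollapse false ls) = _
        rw [if_neg (by simp [hbl])]
        have hpar : pvParas [] (l :: ls) = pvParas [l] ls := by simp [pvParas, hb]
        have hne : pvParas [l] ls ≠ [] := pv_paras_ne ls [l] (by simp)
        rw [hpar, if_neg hne, hpend]
        have := ihC [l] (by simp)
        rw [← this]
        rfl
      · intro cur hc
        show cur ++ (if (PySem.Chars.strip l).isEmpty then _ else l :: pvCollapse false ls) = _
        rw [if_neg (by simp [hbl])]
        have hpar : pvParas cur (l :: ls) = pvParas (cur ++ [l]) ls := by simp [pvParas, hb]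
        rw [hpar, hpend, ← ihC (cur ++ [l]) (by simp)]
        simp

-- invariant: every blank entry of the collapsed list IS the empty line
lemma pv_inv (xs : List (List Char)) (st : List (List Char) × Bool)
    (h : ∀ l ∈ st.1, (PySem.Chars.strip l).isEmpty = true → l = []) :
    ∀ l ∈ (xs.foldl pvStepC st).1, (PySem.Chars.strip l).isEmpty = true → l = [] := by
  induction xs generalizing st with
  | nil => exact h
  | cons x xs ih =>
    refine ih _ ?_
    intro l hl hb
    by_cases hx : (PySem.Chars.strip x).isEmpty = true
    · simp only [pvStepC] at hl
      rw [if_pos hx] at hl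
      split at hl
      · exact h l hl hb
      · rcases List.mem_append.mp hl with h' | h'
        · exact h l h' hb
        · simpa using h'
    · simp only [pvStepC] at hl
      rw [if_neg hx] at hl
      rcases List.mem_append.mp hl with h' | h'
      · exact h l h' hb
      · simp only [List.mem_singleton] at h'
        subst h'
        exact absurd hb hx

lemma pv_strip_cons_nl (cs : List Char) :
    PySem.Chars.strip ('\n' :: cs) = PySem.Chars.strip cs := by
  simp [PySem.Chars.strip, PySem.Chars.lstrip, PySem.Chars.isspace]

lemma pv_rstrip_append_nl (cs : List Char) :
    PySem.Chars.rstrip (cs ++ ['\n']) = PySem.Chars.rstrip cs := by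
  simp [PySem.Chars.rstrip, PySem.Chars.isspace]

lemma pv_strip_append_nl (cs : List Char) :
    PySem.Chars.strip (cs ++ ['\n']) = PySem.Chars.strip cs := by
  simp only [PySem.Chars.strip]
  rcases h : PySem.Chars.lstrip cs with _ | ⟨a, rest⟩
  · have h2 : PySem.Chars.lstrip (cs ++ ['\n']) = [] := by
      simp only [PySem.Chars.lstrip] at h ⊢
      rw [List.dropWhile_append, h]
      simp [PySem.Chars.isspace]
    simp [h2]
  · have h2 : PySem.Chars.lstrip (cs ++ ['\n']) = PySem.Chars.lstrip cs ++ ['\n'] := by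
      simp only [PySem.Chars.lstrip] at h ⊢
      rw [List.dropWhile_append, h]
      simp
    rw [h2, pv_rstrip_append_nl, h]

lemma pv_join_snoc (sep l : List Char) (x : List Char) (xs : List (List Char)) :
    PySem.Chars.join sep ((x :: xs) ++ [l]) = PySem.Chars.join sep (x :: xs) ++ sep ++ l := by
  induction xs generalizing x with
  | nil => simp [PySem.Chars.join, List.intercalate]
  | cons y ys ih =>
    simp only [PySem.Chars.join, List.intercalate, List.cons_append, List.intersperse_cons₂,
      List.flatten_cons] at ih ⊢
    rw [ih y]
    simp

lemma pv_sj_cons_nil (xs : List (List Char)) :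
    pvStripJoin ([] :: xs) = pvStripJoin xs := by
  cases xs with
  | nil => rfl
  | cons y ys =>
    simp only [pvStripJoin, PySem.Chars.join, List.intercalate, List.intersperse_cons₂,
      List.flatten_cons, List.nil_append, List.singleton_append]
    exact pv_strip_cons_nl _

lemma pv_sj_snoc_nil (xs : List (List Char)) :
    pvStripJoin (xs ++ [[]]) = pvStripJoin xs := by
  cases xs with
  | nil => rfl
  | cons y ys =>
    simp only [pvStripJoin]
    rw [pv_join_snoc]
    simp only [List.append_nil]
    exact pv_strip_append_nl _

-- A's leading-blank trim is invisible after the final strip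
lemma pv_sj_dropWhile (xs : List (List Char))
    (h : ∀ l ∈ xs, (PySem.Chars.strip l).isEmpty = true → l = []) :
    pvStripJoin (xs.dropWhile (fun l => (PySem.Chars.strip l).isEmpty)) = pvStripJoin xs := by
  induction xs with
  | nil => rfl
  | cons x xs ih =>
    by_cases hx : (PySem.Chars.strip x).isEmpty = true
    · rw [List.dropWhile_cons, if_pos hx]
      rw [ih (fun l hl => h l (List.mem_cons_of_mem _ hl))]
      have hx0 : x = [] := h x List.mem_cons_self hx
      rw [hx0] at *
      exact (pv_sj_cons_nil xs).symm
    · rw [List.dropWhile_cons, if_neg hx]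

-- A's trailing-blank trim (drop from the reversed list) is invisible after the final strip
lemma pv_sj_dropWhile_back (rs : List (List Char))
    (h : ∀ l ∈ rs, (PySem.Chars.strip l).isEmpty = true → l = []) :
    pvStripJoin ((rs.dropWhile (fun l => (PySem.Chars.strip l).isEmpty)).reverse) =
      pvStripJoin rs.reverse := by
  induction rs with
  | nil => rfl
  | cons r rs ih =>
    by_cases hr : (PySem.Chars.strip r).isEmpty = true
    · rw [List.dropWhile_cons, if_pos hr]
      rw [ih (fun l hl => h l (List.mem_cons_of_mem _ hl))]
      have hr0 : r = [] := h r List.mem_cons_self hr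
      rw [List.reverse_cons, hr0]
      exact (pv_sj_snoc_nil rs.reverse).symm
    · rw [List.dropWhile_cons, if_neg hr]

-- the collapse output of state false strips the same as state true
lemma pv_sj_false_true (ls : List (List Char)) :
    pvStripJoin (pvCollapse false ls) = pvStripJoin (pvCollapse true ls) := by
  cases ls with
  | nil => rfl
  | cons l ls =>
    by_cases hb : (PySem.Chars.strip l).isEmpty = true
    · show pvStripJoin (if (PySem.Chars.strip l).isEmpty then _ else _)
        = pvStripJoin (if (PySem.Chars.strip l).isEmpty then _ else _)
      rw [if_pos hb, if_pos hb]
      show pvStripJoin ([] :: pvCollapse true ls) = pvStripJoin ([] ++ pvCollapse true ls)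
      rw [pv_sj_cons_nil, List.nil_append]
    · show pvStripJoin (if (PySem.Chars.strip l).isEmpty then _ else _)
        = pvStripJoin (if (PySem.Chars.strip l).isEmpty then _ else _)
      rw [if_neg hb, if_neg hb]

-- dropping the possible trailing blank marker is invisible after the final strip
lemma pv_sj_pend (X : List (List Char)) (ls : List (List Char)) :
    pvStripJoin (X ++ pvPend ls) = pvStripJoin X := by
  unfold pvPend
  split
  · exact pv_sj_snoc_nil X
  · simp

-- ===== MAIN COMPUTATION =====
lemma pv_main (lines : List (List Char)) :
    pvStripJoin (((((lines.foldl (fun acc line =>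
        let s := PySem.Chars.strip line
        if s == ['_'] || s == ['_', '_'] || s == ['_', '_', '_'] then acc
        else if !s.isEmpty && s.all (fun c => [' ', '_', '-'].contains c) && decide (s.length ≤ 5) then acc
        else acc ++ [PySem.Chars.rstrip line]) []).foldl (fun (st : List (List Char) × Bool) line =>
        if (PySem.Chars.strip line).isEmpty then
          (if st.2 then st.1 else st.1 ++ [[]], true)
        else (st.1 ++ [line], false)) ([], false)).1.dropWhile
          (fun l => (PySem.Chars.strip l).isEmpty)).reverse.dropWhile
          (fun l => (PySem.Chars.strip l).isEmpty)).reverse) =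
    PySem.Chars.strip (PySem.Chars.join ['\n', '\n']
      ((pvFin (((lines.filter (fun l => !pvJunk l)).map PySem.Chars.rstrip).foldl
        pvStepB ([], []))).map (PySem.Chars.join ['\n']))) := by
  rw [pv_clean_fold_eq, List.nil_append]
  have hstep : (fun (st : List (List Char) × Bool) line =>
      if (PySem.Chars.strip line).isEmpty then
        (if st.2 then st.1 else st.1 ++ [[]], true)
      else (st.1 ++ [line], false)) = pvStepC := rfl
  rw [hstep]
  -- kept list and its blank characterisation
  set kept := pvCleanList lines with hkept
  have hblank : ∀ l ∈ kept, (PySem.Chars.strip l).isEmpty = l.isEmpty := by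
    intro l hl
    rw [hkept] at hl
    unfold pvCleanList at hl
    rcases List.mem_map.mp hl with ⟨x, _, rfl⟩
    exact pv_kept_blank x
  -- remove A's edge trims
  have hinv : ∀ l ∈ (kept.foldl pvStepC ([], false)).1,
      (PySem.Chars.strip l).isEmpty = true → l = [] :=
    pv_inv _ _ (by simp)
  have hinvF : ∀ l ∈ ((kept.foldl pvStepC ([], false)).1.dropWhile
      (fun l => (PySem.Chars.strip l).isEmpty)).reverse,
      (PySem.Chars.strip l).isEmpty = true → l = [] := by
    intro l hl
    exact hinv l ((List.dropWhile_sublist _).mem (List.mem_reverse.mp hl))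
  rw [pv_sj_dropWhile_back _ hinvF, List.reverse_reverse,
    pv_sj_dropWhile _ hinv]
  -- switch to the recursive characterisations
  rw [pv_foldC kept [] false, List.nil_append, pv_sj_false_true kept,
    (pv_TC kept hblank).1]
  have hkB : kept = (lines.filter (fun l => !pvJunk l)).map PySem.Chars.rstrip :=
    pv_clean_eq_keptB lines
  rw [← hkB]
  rw [pv_foldB kept [] [], List.nil_append]
  set P := pvParas [] kept with hP
  have hmem : ∀ p ∈ P, p ≠ [] := fun p hp => pv_paras_mem_ne kept [] p hp
  by_cases hPnil : P = []
  · rw [hPnil, if_pos rfl]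
    simp [pvStripJoin, PySem.Chars.join, List.intercalate, PySem.Chars.strip,
      PySem.Chars.lstrip, PySem.Chars.rstrip]
  · rw [if_neg hPnil, pv_sj_pend]
    unfold pvStripJoin
    rw [pv_join_paras P hmem]

-- ===== VERDICT (by name: the statement is the Claim_ definition above) =====
theorem clean_extra_whitespace_spec : Claim_equal_clean_extra_whitespace := by
  intro text _
  exact congrArg String.ofList (pv_main (PySem.Chars.splitOn text.toList ['\n']))
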